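-- pv_equiv track=rewrite | github.com/Vanaudel/Machine-Learning---Complex-Algorithms | Divide_And_Conquer - Get_Long_Special_Substring.py | GetLongSpecialSubstring_DC
-- ===== SOURCE A (Python) =====
-- def GetLongSpecialSubstring_DC(word):
--     word = str(word)
--
--     #Any string that contains less than 2 characters cannot be a Special String
--     if len(word) < 2:
--         return ""
--
--     #Begin looking for both an uppercase and lowercase instance for each character in word
--     for i in range(len(word)):
--         if ((word[i].upper() not in word) | (word[i].lower() not in word)):
--             left_half_word = GetLongSpecialSubstring_DC(word[:i])
--             right_half_word = GetLongSpecialSubstring_DC(word[i+1:])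
--             return left_half_word if len(left_half_word) > len(right_half_word) else right_half_word
--
--     return word
-- ===== SOURCE B (Python) =====
-- def GetLongSpecialSubstring_DC(word):
--     word = str(word)
--     n = len(word)
--     best = ""
--     for s in range(n):
--         for e in range(s + 2, n + 1):
--             sub = word[s:e]
--             if all(c.upper() in sub and c.lower() in sub for c in sub) and len(sub) >= len(best):
--                 best = sub
--     return best
-- ===== Notes on version B (the rewrite author's own statement) =====
-- stated objective: simpler
-- what changed: Replaced A's divide-and-conquer recursion (split at a character whose case-partner is missing, recurse on both halves, prefer the right half on ties) by a direct brute-force scan over all substrings of length >= 2, keeping the longest special one and overwriting on ties so the latest start wins.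
import Mathlib
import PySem

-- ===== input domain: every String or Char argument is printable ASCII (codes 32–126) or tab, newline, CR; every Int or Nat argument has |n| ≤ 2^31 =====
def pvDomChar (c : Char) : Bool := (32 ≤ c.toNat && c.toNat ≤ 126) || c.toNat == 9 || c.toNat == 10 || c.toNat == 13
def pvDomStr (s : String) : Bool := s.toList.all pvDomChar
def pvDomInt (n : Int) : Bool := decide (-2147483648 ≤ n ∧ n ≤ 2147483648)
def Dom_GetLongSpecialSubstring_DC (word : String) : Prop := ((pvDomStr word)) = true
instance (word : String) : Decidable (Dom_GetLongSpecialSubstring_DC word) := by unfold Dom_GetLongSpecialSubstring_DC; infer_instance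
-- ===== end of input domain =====

-- B replaces A's divide-and-conquer recursion by a brute-force scan of all substrings
-- (objective: simpler); single-char 'c in word' membership is ported as list element
-- membership, which is exact for length-1 substrings.

-- ===== PORT A =====
-- scan of A's for-loop: first index i with word[i].upper() not in word or word[i].lower() not in word
def findBadA (l : List Char) (i : Nat) : Option Nat :=
  if h : i < l.length then
    if !(l.contains (PySem.Chars.upperChar l[i])) || !(l.contains (PySem.Chars.lowerChar l[i])) then
      some i
    else findBadA l (i + 1)
  else none
termination_by l.length - i

theorem findBadA_some_lt (l : List Char) (i j : Nat) (h : findBadA l i = some j) : j < l.length := by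
  fun_induction findBadA l i with
  | case1 i hi hbad => simp_all; omega
  | case2 i hi hbad ih => exact ih h
  | case3 i hi => simp_all

def auxA (l : List Char) : List Char :=
  if l.length < 2 then []
  else
    match hfb : findBadA l 0 with
    | some i =>
      let left_half_word := auxA (l.take i)
      let right_half_word := auxA (l.drop (i + 1))
      if left_half_word.length > right_half_word.length then left_half_word else right_half_word
    | none => l
termination_by l.length
decreasing_by
  · have := findBadA_some_lt l 0 i hfb; simp; omega
  · have := findBadA_some_lt l 0 i hfb; simp; omega

def GetLongSpecialSubstring_DC (word : String) : String :=
  String.ofList (auxA word.toList)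

-- ===== PORT B =====
-- the all(...) specialness test of Source B
def specialB (t : List Char) : Bool :=
  t.all (fun c => t.contains (PySem.Chars.upperChar c) && t.contains (PySem.Chars.lowerChar c))

def GetLongSpecialSubstring_DC_alt (word : String) : String :=
  let l := word.toList
  let n : Int := l.length
  String.ofList
    ((PySem.List.pyRange 0 n 1).foldl (fun best s =>
      (PySem.List.pyRange (s + 2) (n + 1) 1).foldl (fun best e =>
        let sub := PySem.List.slice l (some s) (some e)
        if specialB sub && best.length ≤ sub.length then sub else best) best) [])

-- ===== PRECONDITION & SPEC =====
def Spec_GetLongSpecialSubstring_DC (word : String) (out : String) : Prop := out = GetLongSpecialSubstring_DC_alt word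
instance (word : String) (out : String) : Decidable (Spec_GetLongSpecialSubstring_DC word out) := by unfold Spec_GetLongSpecialSubstring_DC; infer_instance

-- ===== CLAIM (what is proved, stated in full; the proofs are below) =====
def Claim_equal_GetLongSpecialSubstring_DC : Prop := ∀ (word : String), Dom_GetLongSpecialSubstring_DC word → Spec_GetLongSpecialSubstring_DC word (GetLongSpecialSubstring_DC word)

-- ===== LEMMAS AND PROOFS =====

-- the substring of l starting at s with length k
def seg (l : List Char) (s k : Nat) : List Char := (l.drop s).take k

theorem seg_length (l : List Char) (s k : Nat) (h : s + k ≤ l.length) :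
    (seg l s k).length = k := by
  simp [seg]; omega

-- characterisation of the answer, restricted to candidates satisfying P:
-- either no special substring among them and b = "", or b is the longest one,
-- occurring at the largest start among those of maximal length
def GoodB (l : List Char) (P : Nat → Nat → Prop) (b : List Char) : Prop :=
  (b = [] ∧ ∀ s k, s + k ≤ l.length → 2 ≤ k → P s k → specialB (seg l s k) = false)
  ∨ (2 ≤ b.length ∧ specialB b = true ∧ ∃ s, s + b.length ≤ l.length ∧ b = seg l s b.length ∧
      P s b.length ∧
      ∀ s' k, s' + k ≤ l.length → 2 ≤ k → P s' k → specialB (seg l s' k) = true →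
        k < b.length ∨ (k = b.length ∧ s' ≤ s))

def Good (l : List Char) (b : List Char) : Prop := GoodB l (fun _ _ => True) b

theorem GoodB_mono (l : List Char) (P Q : Nat → Nat → Prop) (b : List Char)
    (hPQ : ∀ s k, s + k ≤ l.length → 2 ≤ k → (P s k ↔ Q s k))
    (h : GoodB l P b) : GoodB l Q b := by
  rcases h with ⟨hb, hall⟩ | ⟨h2, hsp, s, hs, hseg, hP, hmax⟩
  · exact Or.inl ⟨hb, fun s k h1 h2 hQ => hall s k h1 h2 ((hPQ s k h1 h2).mpr hQ)⟩
  · exact Or.inr ⟨h2, hsp, s, hs, hseg, (hPQ s b.length hs h2).mp hP,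
      fun s' k h1 hk hQ hspk => hmax s' k h1 hk ((hPQ s' k h1 hk).mpr hQ) hspk⟩

theorem Good_unique (l : List Char) (b1 b2 : List Char)
    (h1 : Good l b1) (h2 : Good l b2) : b1 = b2 := by
  rcases h1 with ⟨e1, n1⟩ | ⟨l1, sp1, s1, hs1, hseg1, -, m1⟩
  · rcases h2 with ⟨e2, -⟩ | ⟨l2, sp2, s2, hs2, hseg2, -, -⟩
    · rw [e1, e2]
    · exact absurd (hseg2 ▸ sp2) (by simp [n1 s2 b2.length hs2 l2 trivial])
  · rcases h2 with ⟨e2, n2⟩ | ⟨l2, sp2, s2, hs2, hseg2, -, m2⟩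
    · exact absurd (hseg1 ▸ sp1) (by simp [n2 s1 b1.length hs1 l1 trivial])
    · have A := m1 s2 b2.length hs2 l2 trivial (hseg2 ▸ sp2)
      have B := m2 s1 b1.length hs1 l1 trivial (hseg1 ▸ sp1)
      have hlen : b1.length = b2.length := by omega
      have hss : s1 = s2 := by omega
      rw [hseg1, hseg2, hlen, hss]

-- A-side
theorem specialB_mem (t : List Char) (h : specialB t = true) (c : Char) (hc : c ∈ t) :
    PySem.Chars.upperChar c ∈ t ∧ PySem.Chars.lowerChar c ∈ t := by
  simp [specialB, List.all_eq_true] at h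
  exact h c hc

theorem seg_take (l : List Char) (i s k : Nat) (h : s + k ≤ i) :
    seg (l.take i) s k = seg l s k := by
  unfold seg
  rw [List.drop_take, List.take_take]
  congr 1
  omega

theorem seg_drop (l : List Char) (i s k : Nat) :
    seg (l.drop i) s k = seg l (i + s) k := by
  unfold seg
  rw [List.drop_drop]

theorem mem_seg (l : List Char) (s k i : Nat) (hi : i < l.length) (hs : s ≤ i)
    (hik : i < s + k) (hsk : s + k ≤ l.length) : l[i] ∈ seg l s k := by
  rw [List.mem_iff_getElem]
  have hlt : i - s < (seg l s k).length := by rw [seg_length l s k hsk]; omega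
  refine ⟨i - s, hlt, ?_⟩
  have hidx : s + (i - s) = i := by omega
  simp [seg]
  simp only [hidx]

theorem crossing (l : List Char) (i : Nat) (hi : i < l.length)
    (hbad : (!(l.contains (PySem.Chars.upperChar l[i])) || !(l.contains (PySem.Chars.lowerChar l[i]))) = true)
    (s k : Nat) (h1 : s + k ≤ l.length) (hs : s ≤ i) (hik : i < s + k) :
    specialB (seg l s k) = false := by
  by_contra h
  have hsp : specialB (seg l s k) = true := by simpa using h
  obtain ⟨hu, hlo⟩ := specialB_mem _ hsp _ (mem_seg l s k i hi hs hik h1)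
  have hu' : PySem.Chars.upperChar l[i] ∈ l :=
    List.mem_of_mem_drop (List.mem_of_mem_take hu)
  have hlo' : PySem.Chars.lowerChar l[i] ∈ l :=
    List.mem_of_mem_drop (List.mem_of_mem_take hlo)
  simp [hu', hlo'] at hbad

theorem findBadA_none_spec (l : List Char) (i : Nat) (h : findBadA l i = none) :
    ∀ j, i ≤ j → (hj : j < l.length) →
      PySem.Chars.upperChar l[j] ∈ l ∧ PySem.Chars.lowerChar l[j] ∈ l := by
  fun_induction findBadA l i with
  | case1 i hi hbad => simp_all
  | case2 i hi hbad ih =>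
    intro j hij hj
    rcases Nat.eq_or_lt_of_le hij with rfl | hlt
    · simpa using hbad
    · exact ih h j (by omega) hj
  | case3 i hi =>
    intro j hij hj
    omega

theorem findBadA_some_spec (l : List Char) (i j : Nat) (h : findBadA l i = some j) :
    ∃ (hj : j < l.length),
      (!(l.contains (PySem.Chars.upperChar l[j])) || !(l.contains (PySem.Chars.lowerChar l[j]))) = true := by
  fun_induction findBadA l i with
  | case1 i hi hbad =>
    obtain rfl : i = j := by simp_all
    exact ⟨hi, by simpa using hbad⟩
  | case2 i hi hbad ih => exact ih h
  | case3 i hi => simp_all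

theorem combine (l : List Char) (i : Nat) (hi : i < l.length)
    (hbad : (!(l.contains (PySem.Chars.upperChar l[i])) || !(l.contains (PySem.Chars.lowerChar l[i]))) = true)
    (L R : List Char) (hGL : Good (l.take i) L) (hGR : Good (l.drop (i + 1)) R) :
    Good l (if L.length > R.length then L else R) := by
  have lenTake : (l.take i).length = i := by simp; omega
  have lenDrop : (l.drop (i + 1)).length = l.length - (i + 1) := by simp
  have hcross : ∀ s k, s + k ≤ l.length → 1 ≤ k → specialB (seg l s k) = true →
      s + k ≤ i ∨ i + 1 ≤ s := by
    intro s k h1 hk hsp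
    by_contra hc
    push Not at hc
    have := crossing l i hi hbad s k h1 (by omega) (by omega)
    rw [this] at hsp
    exact (Bool.false_ne_true hsp).elim
  have hsegD : ∀ s k, i + 1 ≤ s → seg (l.drop (i + 1)) (s - (i + 1)) k = seg l s k := by
    intro s k hsi
    rw [seg_drop]
    congr 1
    omega
  rcases hGL with ⟨eL, nL⟩ | ⟨l1, sp1, s1, hs1, hseg1, -, m1⟩
  · rcases hGR with ⟨eR, nR⟩ | ⟨l2, sp2, s2, hs2, hseg2, -, m2⟩
    · -- no special substring anywhere
      rw [eL, eR]
      refine Or.inl ⟨by simp, ?_⟩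
      intro s k h1 h2 _
      by_contra h
      have hsp : specialB (seg l s k) = true := by simpa using h
      rcases hcross s k h1 (by omega) hsp with hle | hge
      · have := nL s k (by omega) h2 trivial
        rw [seg_take l i s k hle] at this
        rw [this] at hsp; exact (Bool.false_ne_true hsp).elim
      · have := nR (s - (i + 1)) k (by omega) h2 trivial
        rw [hsegD s k hge] at this
        rw [this] at hsp; exact (Bool.false_ne_true hsp).elim
    · -- only the right half has a special substring
      rw [eL]
      have hif : ¬ (([] : List Char).length > R.length) := by simp
      rw [if_neg hif]
      refine Or.inr ⟨l2, sp2, i + 1 + s2, by omega, ?_, trivial, ?_⟩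
      · have e : i + 1 + s2 - (i + 1) = s2 := by omega
        rw [← hsegD (i + 1 + s2) R.length (by omega), e, ← hseg2]
      · intro s' k h1 h2 _ hsp
        rcases hcross s' k h1 (by omega) hsp with hle | hge
        · have := nL s' k (by omega) h2 trivial
          rw [seg_take l i s' k hle] at this
          rw [this] at hsp; exact (Bool.false_ne_true hsp).elim
        · have := m2 (s' - (i + 1)) k (by omega) h2 trivial (by rw [hsegD s' k hge]; exact hsp)
          omega
  · rcases hGR with ⟨eR, nR⟩ | ⟨l2, sp2, s2, hs2, hseg2, -, m2⟩
    · -- only the left half has a special substring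
      rw [eR]
      have hif : L.length > ([] : List Char).length := by simp; omega
      rw [if_pos hif]
      refine Or.inr ⟨l1, sp1, s1, by omega, ?_, trivial, ?_⟩
      · rw [← seg_take l i s1 L.length (by omega), ← hseg1]
      · intro s' k h1 h2 _ hsp
        rcases hcross s' k h1 (by omega) hsp with hle | hge
        · have := m1 s' k (by omega) h2 trivial (by rw [seg_take l i s' k hle]; exact hsp)
          omega
        · have := nR (s' - (i + 1)) k (by omega) h2 trivial
          rw [hsegD s' k hge] at this
          rw [this] at hsp; exact (Bool.false_ne_true hsp).elim
    · -- both halves: compare lengths, ties go right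
      by_cases hgt : L.length > R.length
      · rw [if_pos hgt]
        refine Or.inr ⟨l1, sp1, s1, by omega, ?_, trivial, ?_⟩
        · rw [← seg_take l i s1 L.length (by omega), ← hseg1]
        · intro s' k h1 h2 _ hsp
          rcases hcross s' k h1 (by omega) hsp with hle | hge
          · have := m1 s' k (by omega) h2 trivial (by rw [seg_take l i s' k hle]; exact hsp)
            omega
          · have := m2 (s' - (i + 1)) k (by omega) h2 trivial (by rw [hsegD s' k hge]; exact hsp)
            omega
      · rw [if_neg hgt]
        refine Or.inr ⟨l2, sp2, i + 1 + s2, by omega, ?_, trivial, ?_⟩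
        · have e : i + 1 + s2 - (i + 1) = s2 := by omega
          rw [← hsegD (i + 1 + s2) R.length (by omega), e, ← hseg2]
        · intro s' k h1 h2 _ hsp
          rcases hcross s' k h1 (by omega) hsp with hle | hge
          · have := m1 s' k (by omega) h2 trivial (by rw [seg_take l i s' k hle]; exact hsp)
            omega
          · have := m2 (s' - (i + 1)) k (by omega) h2 trivial (by rw [hsegD s' k hge]; exact hsp)
            omega

theorem goodA_aux : ∀ (n : Nat) (l : List Char), l.length ≤ n → Good l (auxA l) := by
  intro n
  induction n with
  | zero =>
    intro l hl
    rw [auxA, if_pos (by omega)]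
    exact Or.inl ⟨rfl, fun s k h1 h2 _ => by omega⟩
  | succ n ih =>
    intro l hl
    rw [auxA]
    by_cases hlt : l.length < 2
    · rw [if_pos hlt]
      exact Or.inl ⟨rfl, fun s k h1 h2 _ => by omega⟩
    · rw [if_neg hlt]
      split
      case _ i hfb =>
        obtain ⟨hi, hbad⟩ := findBadA_some_spec l 0 i hfb
        have hGL := ih (l.take i) (by simp; omega)
        have hGR := ih (l.drop (i + 1)) (by simp; omega)
        exact combine l i hi hbad _ _ hGL hGR
      case _ hfb =>
        have hall := findBadA_none_spec l 0 hfb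
        refine Or.inr ⟨by omega, ?_, 0, by omega, by simp [seg], trivial, ?_⟩
        · rw [specialB, List.all_eq_true]
          intro c hc
          obtain ⟨j, hj, rfl⟩ := List.mem_iff_getElem.mp hc
          obtain ⟨h1, h2⟩ := hall j (by omega) hj
          simp [h1, h2]
        · intro s' k _ _ _ _
          omega

theorem goodA (l : List Char) : Good l (auxA l) := goodA_aux l.length l le_rfl

-- B-side
def innerF (l : List Char) (S : Nat) (b : List Char) (j : Nat) : List Char :=
  let sub := seg l S (j + 2)
  if specialB sub && b.length ≤ sub.length then sub else b

def bestNat (l : List Char) : List Char :=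
  (List.range l.length).foldl
    (fun b S => (List.range (l.length - S - 1)).foldl (innerF l S) b) []

theorem alt_eq (l : List Char) :
    (GetLongSpecialSubstring_DC_alt (String.ofList l)).toList = bestNat l := by
  unfold GetLongSpecialSubstring_DC_alt bestNat
  simp only [String.toList_ofList]
  rw [PySem.List.pyRange_one, List.foldl_map]
  have hn : ((l.length : Int) - 0).toNat = l.length := by omega
  rw [hn]
  apply List.foldl_ext
  intro b S hS
  rw [List.mem_range] at hS
  have hm : ((l.length : Int) + 1 - (0 + (S : Int) + 2)).toNat = l.length - S - 1 := by omega
  rw [PySem.List.pyRange_one, List.foldl_map, hm]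
  apply List.foldl_ext
  intro b' j hj
  rw [List.mem_range] at hj
  simp only [zero_add]
  have e2 : ((S : Int)) + 2 + (j : Int) = (((S + 2 + j : Nat)) : Int) := by push_cast; omega
  rw [e2, PySem.List.slice_natCast]
  have e3 : S + 2 + j - S = j + 2 := by omega
  rw [e3]
  rfl

theorem step_inv (l : List Char) (S K : Nat) (b : List Char)
    (hcand : S + K ≤ l.length) (hK : 2 ≤ K)
    (h : GoodB l (fun s k => s < S ∨ (s = S ∧ k < K)) b) :
    GoodB l (fun s k => s < S ∨ (s = S ∧ k < K + 1))
      (if specialB (seg l S K) && b.length ≤ (seg l S K).length then seg l S K else b) := by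
  have hlen : (seg l S K).length = K := seg_length l S K hcand
  by_cases hsp : specialB (seg l S K) = true
  · by_cases hle : b.length ≤ (seg l S K).length
    · rw [if_pos (by simp [hsp, hle])]
      refine Or.inr ⟨by omega, hsp, S, by omega, by rw [hlen], Or.inr ⟨rfl, by omega⟩, ?_⟩
      intro s' k h1 h2 hP hsp'
      rcases hP with h' | ⟨rfl, hk⟩
      · rcases h with ⟨eb, nb⟩ | ⟨l2, -, s2, -, -, hP2, m2⟩
        · exact ((Bool.false_ne_true ((nb s' k h1 h2 (Or.inl h')) ▸ hsp')).elim)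
        · have := m2 s' k h1 h2 (Or.inl h') hsp'
          have hs2S : s2 ≤ S := by rcases hP2 with h'' | ⟨rfl, -⟩ <;> omega
          rw [hlen] at hle ⊢
          omega
      · by_cases hkK : k < K
        · rcases h with ⟨eb, nb⟩ | ⟨l2, -, s2, -, -, hP2, m2⟩
          · exact ((Bool.false_ne_true ((nb s' k h1 h2 (Or.inr ⟨rfl, hkK⟩)) ▸ hsp')).elim)
          · have := m2 s' k h1 h2 (Or.inr ⟨rfl, hkK⟩) hsp'
            rw [hlen] at hle ⊢
            omega
        · rw [hlen]
          omega
    · rw [if_neg (by simp [hsp]; try omega)]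
      rcases h with ⟨eb, nb⟩ | ⟨l2, sp2, s2, hs2, hseg2, hP2, m2⟩
      · exfalso; rw [eb] at hle; simp at hle
      · refine Or.inr ⟨l2, sp2, s2, hs2, hseg2, ?_, ?_⟩
        · rcases hP2 with h' | ⟨rfl, hk⟩
          · exact Or.inl h'
          · exact Or.inr ⟨rfl, by omega⟩
        · intro s' k h1 h2 hP hsp'
          rcases hP with h' | ⟨rfl, hk⟩
          · exact m2 s' k h1 h2 (Or.inl h') hsp'
          · by_cases hkK : k < K
            · exact m2 s' k h1 h2 (Or.inr ⟨rfl, hkK⟩) hsp'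
            · have hkeq : k = K := by omega
              rw [hlen] at hle
              omega
  · have hspf : specialB (seg l S K) = false := by simpa using hsp
    rw [if_neg (by simp [hspf])]
    rcases h with ⟨eb, nb⟩ | ⟨l2, sp2, s2, hs2, hseg2, hP2, m2⟩
    · refine Or.inl ⟨eb, ?_⟩
      intro s' k h1 h2 hP
      rcases hP with h' | ⟨rfl, hk⟩
      · exact nb s' k h1 h2 (Or.inl h')
      · by_cases hkK : k < K
        · exact nb s' k h1 h2 (Or.inr ⟨rfl, hkK⟩)
        · have hkeq : k = K := by omega
          rw [hkeq]; exact hspf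
    · refine Or.inr ⟨l2, sp2, s2, hs2, hseg2, ?_, ?_⟩
      · rcases hP2 with h' | ⟨rfl, hk⟩
        · exact Or.inl h'
        · exact Or.inr ⟨rfl, by omega⟩
      · intro s' k h1 h2 hP hsp'
        rcases hP with h' | ⟨rfl, hk⟩
        · exact m2 s' k h1 h2 (Or.inl h') hsp'
        · by_cases hkK : k < K
          · exact m2 s' k h1 h2 (Or.inr ⟨rfl, hkK⟩) hsp'
          · have hkeq : k = K := by omega
            rw [hkeq] at hsp'
            exact ((Bool.false_ne_true (hspf ▸ hsp')).elim)

theorem inner_inv (l : List Char) (S : Nat) :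
    ∀ (m : Nat) (b : List Char), S + m + 1 ≤ l.length →
      GoodB l (fun s _ => s < S) b →
      GoodB l (fun s k => s < S ∨ (s = S ∧ k < m + 2)) ((List.range m).foldl (innerF l S) b) := by
  intro m
  induction m with
  | zero =>
    intro b hb h
    simp only [List.range_zero, List.foldl_nil]
    refine GoodB_mono l _ _ b (fun s k h1 h2 => ?_) h
    constructor
    · intro h'; exact Or.inl h'
    · rintro (h' | ⟨rfl, hk⟩)
      · exact h'
      · omega
  | succ m ih =>
    intro b hb h
    rw [List.range_succ, List.foldl_append, List.foldl_cons, List.foldl_nil]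
    have prev := ih b (by omega) h
    have step := step_inv l S (m + 2) ((List.range m).foldl (innerF l S) b) (by omega) (by omega) prev
    refine GoodB_mono l _ _ _ (fun s k h1 h2 => ?_) step
    constructor
    · rintro (h' | ⟨rfl, hk⟩)
      · exact Or.inl h'
      · exact Or.inr ⟨rfl, by omega⟩
    · rintro (h' | ⟨rfl, hk⟩)
      · exact Or.inl h'
      · exact Or.inr ⟨rfl, by omega⟩

theorem outer_inv (l : List Char) :
    ∀ (S : Nat), S ≤ l.length →
      GoodB l (fun s _ => s < S)
        ((List.range S).foldl
          (fun b S' => (List.range (l.length - S' - 1)).foldl (innerF l S') b) []) := by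
  intro S
  induction S with
  | zero =>
    intro _
    simp only [List.range_zero, List.foldl_nil]
    exact Or.inl ⟨rfl, fun s k _ _ hP => by omega⟩
  | succ S ih =>
    intro hS
    rw [List.range_succ, List.foldl_append, List.foldl_cons, List.foldl_nil]
    have prev := ih (by omega)
    have hin := inner_inv l S (l.length - S - 1) _ (by omega) prev
    refine GoodB_mono l _ _ _ (fun s k h1 h2 => ?_) hin
    constructor
    · rintro (h' | ⟨rfl, hk⟩)
      · omega
      · omega
    · intro h'
      by_cases hsS : s < S
      · exact Or.inl hsS
      · exact Or.inr ⟨by omega, by omega⟩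

theorem goodB (l : List Char) : Good l (GetLongSpecialSubstring_DC_alt (String.ofList l)).toList := by
  rw [alt_eq]
  unfold bestNat
  refine GoodB_mono l _ _ _ (fun s k h1 h2 => ?_) (outer_inv l l.length le_rfl)
  constructor
  · intro _; trivial
  · intro _; omega

-- ===== VERDICT (by name: the statement is the Claim_ definition above) =====
theorem GetLongSpecialSubstring_DC_spec : Claim_equal_GetLongSpecialSubstring_DC := by
  intro word _
  unfold Spec_GetLongSpecialSubstring_DC GetLongSpecialSubstring_DC
  have h := Good_unique word.toList (auxA word.toList)
    (GetLongSpecialSubstring_DC_alt (String.ofList word.toList)).toList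
    (goodA word.toList) (goodB word.toList)
  rw [h]
  simp
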